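-- pv_equiv track=rewrite | github.com/pohily/checkio | is_stressful.py | is_stressful
-- ===== SOURCE A (Python) =====
-- def is_stressful(subj):
--     """
--         recoognise stressful subject
--     """
--     """### 1
--     if subj[-3:] == '!!!':
--         return True
--
--     ### 2
--     upper = True
--     for elem in subj:
--         if ord(elem)== 33 or ord(elem) == 63 or ord(elem) == 32 or ord(elem) == 44 or ord(elem) == 46 or ord(elem) == 45:
--             continue
--         if (65 > ord(elem) or ord(elem) > 90):
--             upper = False
--     if upper == True:
--         return True"""
--
--     ### 3
--     subj = subj.lower()
--     red = ["help", "asap", "urgent"]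
--     for word in red:
--         if word in subj:
--             return True
--
--     for word in red:
--         test_subj = subj.split()
--
--         for test in test_subj:
--             is_in = True
--             for letter in word:
--
--                 if letter in test:
--
--                     test = test[test.index(letter)+1:]
--                 else:
--                     is_in = False
--                     break
--             if is_in == True:
--                 return True
--     return False
-- ===== SOURCE B (Python) =====
-- def is_stressful(subj):
--     """recognise stressful subject: one left-to-right scan of the lowercased
--     subject, tracking for every red word how many of its characters have been
--     matched (in order) inside the current whitespace-separated token."""
--     state = [(w, 0) for w in ("help", "asap", "urgent")]
--     for ch in subj.lower():
--         if ch.isspace():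
--             state = [(w, 0) for w, _ in state]
--         else:
--             state = [(w, p + 1) if p < len(w) and w[p] == ch else (w, p)
--                      for w, p in state]
--             if any(p == len(w) for w, p in state):
--                 return True
--     return False
-- ===== Notes on version B (the rewrite author's own statement) =====
-- stated objective: alternative
-- what changed: A tests each red word separately (substring check, then per-token greedy index()+slice subsequence matching over splits recomputed per word); B never splits or substring-tests: it makes one left-to-right scan of the lowercased subject driving a simultaneous multi-pattern automaton (one progress counter per red word, reset at whitespace), correct because the substring pass is subsumed by subsequence matching within a token (red words contain no whitespace).
import Mathlib
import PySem

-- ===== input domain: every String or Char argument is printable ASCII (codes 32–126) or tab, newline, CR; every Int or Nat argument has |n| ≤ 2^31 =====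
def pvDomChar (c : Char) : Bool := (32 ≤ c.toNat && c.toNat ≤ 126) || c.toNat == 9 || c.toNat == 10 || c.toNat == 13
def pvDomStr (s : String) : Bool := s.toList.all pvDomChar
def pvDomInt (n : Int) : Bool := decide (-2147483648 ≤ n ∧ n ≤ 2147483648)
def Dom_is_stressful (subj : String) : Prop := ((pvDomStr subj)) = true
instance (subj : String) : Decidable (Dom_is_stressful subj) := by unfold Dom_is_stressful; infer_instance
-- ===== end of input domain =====

-- B replaces A's per-word substring test + per-token index()/slice subsequence scans by ONE
-- left-to-right scan of the lowercased subject driving a simultaneous multi-pattern automaton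
-- (a progress counter per red word, reset at whitespace); objective: alternative.

-- ===== PORT A =====

-- inner loop of A: for letter in word: if letter in test: test = test[test.index(letter)+1:] else: break
def aCheck : List Char → List Char → Bool
  | [], _ => true
  | c :: w, test =>
    if test.contains c then
      aCheck w (PySem.List.slice test (some (((PySem.List.index? test c).getD 0 : Int) + 1)) none)
    else false

-- first loop: for word in red: if word in subj: return True
def aLoop1 : List String → String → Bool
  | [], _ => false
  | w :: ws, s => if PySem.Str.isIn w s then true else aLoop1 ws s

-- inner token loop: for test in test_subj: … if is_in: return True
def aTokens : List String → String → Bool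
  | [], _ => false
  | t :: ts, w => if aCheck w.toList t.toList then true else aTokens ts w

-- second loop: for word in red: test_subj = subj.split(); …
def aLoop2 : List String → String → Bool
  | [], _ => false
  | w :: ws, s => if aTokens (PySem.Str.split₀ s) w then true else aLoop2 ws s

def is_stressful (subj : String) : Bool :=
  let subj := PySem.Str.lower subj
  let red : List String := ["help", "asap", "urgent"]
  if aLoop1 red subj then true
  else aLoop2 red subj

-- ===== PORT B =====

-- one state entry per red word: (word, chars matched so far); step on a non-space char
def bStep (ch : Char) (wp : List Char × Nat) : List Char × Nat :=
  if wp.2 < wp.1.length && wp.1[wp.2]? == some ch then (wp.1, wp.2 + 1) else wp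

-- for ch in subj.lower(): reset at whitespace, else advance every counter, return True if any completed
def bScan : List Char → List (List Char × Nat) → Bool
  | [], _ => false
  | ch :: rest, st =>
    if PySem.Chars.isspace ch then
      bScan rest (st.map (fun wp => (wp.1, 0)))
    else
      let st' := st.map (bStep ch)
      if st'.any (fun wp => wp.2 == wp.1.length) then true
      else bScan rest st'

def is_stressful_alt (subj : String) : Bool :=
  bScan (PySem.Str.lower subj).toList
    (["help", "asap", "urgent"].map (fun w => (w.toList, 0)))

-- ===== PRECONDITION & SPEC =====
def Spec_is_stressful (subj : String) (out : Bool) : Prop := out = is_stressful_alt subj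
instance (subj : String) (out : Bool) : Decidable (Spec_is_stressful subj out) := by unfold Spec_is_stressful; infer_instance

-- ===== CLAIM (what is proved, stated in full; the proofs are below) =====
def Claim_equal_is_stressful : Prop := ∀ (subj : String), Dom_is_stressful subj → Spec_is_stressful subj (is_stressful subj)

-- ===== LEMMAS AND PROOFS =====

-- proof-side greedy subsequence test, the common reference for both ports
def bConsume (c : Char) : List Char → Option (List Char)
  | [] => none
  | x :: xs => if x = c then some xs else bConsume c xs

def bSubseq : List Char → List Char → Bool
  | [], _ => true
  | c :: w, t =>
    match bConsume c t with
    | some t' => bSubseq w t'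
    | none => false

theorem bConsume_eq_none (c : Char) (t : List Char) (h : c ∉ t) : bConsume c t = none := by
  induction t with
  | nil => rfl
  | cons x xs ih =>
    simp only [List.mem_cons, not_or] at h
    simp [bConsume, Ne.symm h.1, ih h.2]

theorem bConsume_eq_some (c : Char) (t : List Char) (h : c ∈ t) :
    bConsume c t = some (t.drop (t.idxOf c + 1)) := by
  induction t with
  | nil => cases h
  | cons x xs ih =>
    by_cases hx : x = c
    · subst hx; simp [bConsume, List.idxOf_cons_self]
    · have hc : c ∈ xs := by
        rcases List.mem_cons.mp h with h1 | h1
        · exact absurd h1.symm hx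
        · exact h1
      simp [bConsume, hx, ih hc, List.idxOf_cons_ne _ hx]

theorem index?_eq_some_idxOf (t : List Char) (c : Char) (h : c ∈ t) :
    PySem.List.index? t c = some (t.idxOf c) := by
  induction t with
  | nil => cases h
  | cons x xs ih =>
    by_cases hx : x = c
    · subst hx; rw [PySem.List.index?_cons_self]; simp [List.idxOf_cons_self]
    · have hc : c ∈ xs := by
        rcases List.mem_cons.mp h with h1 | h1
        · exact absurd h1.symm hx
        · exact h1
      rw [PySem.List.index?_cons_of_ne xs hx, ih hc, List.idxOf_cons_ne _ hx]
      rfl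

theorem aCheck_eq_bSubseq (w t : List Char) : aCheck w t = bSubseq w t := by
  induction w generalizing t with
  | nil => rfl
  | cons c w ih =>
    by_cases hc : c ∈ t
    · have hslice : PySem.List.slice t (some (((PySem.List.index? t c).getD 0 : Int) + 1)) none
          = t.drop (t.idxOf c + 1) := by
        rw [index?_eq_some_idxOf t c hc]
        have hcast : ((t.idxOf c : Nat) : Int) + 1 = ((t.idxOf c + 1 : Nat) : Int) := by push_cast; ring
        simp only [Option.getD_some, hcast]
        exact PySem.List.slice_from_natCast t _
      rw [aCheck, if_pos (by simpa using hc), hslice, ih, bSubseq, bConsume_eq_some c t hc]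
    · simp [aCheck, bSubseq, hc, bConsume_eq_none c t hc]

-- a sublist headed by c is a sublist of the tail after the FIRST c
theorem sublist_drop_idxOf (c : Char) (w t : List Char) (h : (c :: w).Sublist t) :
    w.Sublist (t.drop (t.idxOf c + 1)) := by
  induction t with
  | nil => cases h
  | cons x xs ih =>
    by_cases hx : x = c
    · subst hx
      simp only [List.idxOf_cons_self, List.drop_succ_cons, List.drop_zero]
      cases h with
      | cons _ h' => exact (List.sublist_cons_self _ w).trans h'
      | cons₂ _ h' => exact h'
    · have h' : (c :: w).Sublist xs := by
        cases h with
        | cons _ h' => exact h'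
        | cons₂ _ h' => exact absurd rfl hx
      rw [List.idxOf_cons_ne _ hx]
      simpa using ih h'

theorem bSubseq_of_sublist (w t : List Char) (h : w.Sublist t) : bSubseq w t = true := by
  induction w generalizing t with
  | nil => rfl
  | cons c w ih =>
    have hc : c ∈ t := h.subset (List.mem_cons_self ..)
    simp only [bSubseq, bConsume_eq_some c t hc]
    exact ih _ (sublist_drop_idxOf c w t h)

theorem sublist_of_bConsume (c : Char) (t t' : List Char) (h : bConsume c t = some t') :
    (c :: t').Sublist t := by
  induction t with
  | nil => simp [bConsume] at h
  | cons x xs ih =>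
    by_cases hx : x = c
    · subst hx
      simp [bConsume] at h
      subst h
      exact List.Sublist.refl _
    · simp [bConsume, hx] at h
      exact (ih h).cons x

theorem sublist_of_bSubseq (w t : List Char) (h : bSubseq w t = true) : w.Sublist t := by
  induction w generalizing t with
  | nil => exact List.nil_sublist t
  | cons c w ih =>
    rw [bSubseq] at h
    cases hcons : bConsume c t with
    | none => rw [hcons] at h; cases h
    | some t' =>
      rw [hcons] at h
      exact ((ih t' h).cons₂ c).trans (sublist_of_bConsume c t t' hcons)

-- a prefix of xs ++ c :: ys avoiding c is a prefix of xs
theorem prefix_of_append_cons (c : Char) (w xs ys : List Char) :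
    c ∉ w → w <+: xs ++ c :: ys → w <+: xs := by
  induction w generalizing xs with
  | nil => intro _ _; exact List.nil_prefix
  | cons a w ih =>
    intro hc h
    cases xs with
    | nil =>
      simp only [List.nil_append, List.cons_prefix_cons] at h
      exact absurd (List.mem_cons_self ..) (h.1 ▸ hc)
    | cons x xs =>
      simp only [List.cons_append, List.cons_prefix_cons] at h ⊢
      exact ⟨h.1, ih xs (fun hm => hc (List.mem_cons_of_mem _ hm)) h.2⟩

-- an infix avoiding c cannot straddle c
theorem infix_split (c : Char) (w xs ys : List Char) :
    c ∉ w → w <:+: xs ++ c :: ys → w <:+: xs ∨ w <:+: ys := by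
  induction xs with
  | nil =>
    intro hc h
    simp only [List.nil_append] at h
    rcases List.infix_cons_iff.mp h with hp | hi
    · cases w with
      | nil => exact Or.inl List.nil_infix
      | cons a w =>
        simp only [List.cons_prefix_cons] at hp
        exact absurd (hp.1 ▸ List.mem_cons_self ..) hc
    · exact Or.inr hi
  | cons x xs ih =>
    intro hc h
    rcases List.infix_cons_iff.mp h with hp | hi
    · cases w with
      | nil => exact Or.inl List.nil_infix
      | cons a w =>
        simp only [List.cons_prefix_cons] at hp
        have hcw : c ∉ w := fun hm => hc (List.mem_cons_of_mem _ hm)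
        have hpre : (a :: w) <+: (x :: xs) :=
          List.cons_prefix_cons.mpr ⟨hp.1, prefix_of_append_cons c w xs ys hcw hp.2⟩
        exact Or.inl hpre.isInfix
    · rcases ih hc hi with h1 | h1
      · exact Or.inl (h1.trans (List.infix_cons (List.infix_refl _)))
      · exact Or.inr h1

theorem split₀_go_append (rest cur : List Char) (acc : List (List Char)) :
    PySem.Chars.split₀.go rest cur acc = acc.reverse ++ PySem.Chars.split₀.go rest cur [] := by
  induction rest generalizing cur acc with
  | nil =>
    by_cases hcur : cur.isEmpty
    · simp [PySem.Chars.split₀.go, hcur]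
    · simp [PySem.Chars.split₀.go, hcur]
  | cons c rest ih =>
    by_cases hsp : PySem.Chars.isspace c
    · by_cases hcur : cur.isEmpty
      · simp only [PySem.Chars.split₀.go, hsp, hcur, if_true]
        exact ih _ _
      · simp only [PySem.Chars.split₀.go, hsp, hcur, if_true]
        rw [ih [] (cur.reverse :: acc), ih [] [cur.reverse]]
        simp
    · simp only [PySem.Chars.split₀.go, hsp]
      exact ih _ _

theorem split₀_go_infix (w : List Char) (hw : w ≠ [])
    (hns : ∀ c ∈ w, PySem.Chars.isspace c = false) :
    ∀ (rest cur : List Char), w <:+: (cur.reverse ++ rest) →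
      ∃ t ∈ PySem.Chars.split₀.go rest cur [], w <:+: t := by
  intro rest
  induction rest with
  | nil =>
    intro cur h
    simp only [List.append_nil] at h
    have hcur : cur.isEmpty = false := by
      cases cur with
      | nil =>
        exfalso
        exact hw (List.eq_nil_of_infix_nil (by simpa using h))
      | cons _ _ => rfl
    refine ⟨cur.reverse, ?_, h⟩
    simp [PySem.Chars.split₀.go, hcur]
  | cons c rest ih =>
    intro cur h
    by_cases hsp : PySem.Chars.isspace c
    · have hcnot : c ∉ w := by
        intro hm
        have := hns c hm
        rw [hsp] at this
        exact absurd this (by simp)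
      rcases infix_split c w cur.reverse rest hcnot h with h1 | h1
      · have hcur : cur.isEmpty = false := by
          cases cur with
          | nil =>
            exfalso
            exact hw (List.eq_nil_of_infix_nil (by simpa using h1))
          | cons _ _ => rfl
        refine ⟨cur.reverse, ?_, h1⟩
        simp [PySem.Chars.split₀.go, hsp, hcur, split₀_go_append rest [] [cur.reverse]]
      · rcases ih [] (by simpa using h1) with ⟨t, ht, hwt⟩
        refine ⟨t, ?_, hwt⟩
        by_cases hcur : cur.isEmpty
        · simpa [PySem.Chars.split₀.go, hsp, hcur] using ht
        · simp [PySem.Chars.split₀.go, hsp, hcur, split₀_go_append rest [] [cur.reverse], ht]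
    · have h' : w <:+: ((c :: cur).reverse ++ rest) := by
        simpa [List.append_assoc] using h
      rcases ih (c :: cur) h' with ⟨t, ht, hwt⟩
      exact ⟨t, by simpa [PySem.Chars.split₀.go, hsp] using ht, hwt⟩

-- a whitespace-free nonempty infix of s is an infix of one of s.split()'s tokens
theorem split₀_of_infix (w s : List Char) (hw : w ≠ [])
    (hns : ∀ c ∈ w, PySem.Chars.isspace c = false) (h : w <:+: s) :
    ∃ t ∈ PySem.Chars.split₀ s, w <:+: t :=
  split₀_go_infix w hw hns s [] (by simpa using h)

-- word in subj ⇒ word is a subsequence of some token of subj.split()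
theorem loop1_covered (w s : String) (hw : w.toList ≠ [])
    (hns : ∀ c ∈ w.toList, PySem.Chars.isspace c = false)
    (h : PySem.Str.isIn w s = true) :
    ∃ t ∈ PySem.Str.split₀ s, bSubseq w.toList t.toList = true := by
  have hinf : w.toList <:+: s.toList := (PySem.Str.isIn_iff_infix w s).mp h
  rcases split₀_of_infix w.toList s.toList hw hns hinf with ⟨t, ht, hwt⟩
  have hmap : (PySem.Str.split₀ s).map String.toList = PySem.Chars.split₀ s.toList :=
    PySem.Str.split₀_map_toList s
  have hmem : t ∈ (PySem.Str.split₀ s).map String.toList := hmap ▸ ht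
  rcases List.mem_map.mp hmem with ⟨t', ht', rfl⟩
  exact ⟨t', ht', bSubseq_of_sublist _ _ hwt.sublist⟩

theorem aTokens_eq_any (ts : List String) (w : String) :
    aTokens ts w = ts.any (fun t => bSubseq w.toList t.toList) := by
  induction ts with
  | nil => rfl
  | cons t ts ih =>
    simp only [aTokens, List.any_cons, aCheck_eq_bSubseq, ih]
    by_cases h : bSubseq w.toList t.toList <;> simp [h]

theorem ite_bool (a b : Bool) : (if a = true then true else b) = (a || b) := by
  cases a <;> simp

theorem combined (ws : List String) (s : String)
    (hws : ∀ w ∈ ws, w.toList ≠ [] ∧ ∀ c ∈ w.toList, PySem.Chars.isspace c = false) :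
    (aLoop1 ws s || aLoop2 ws s)
      = ws.any (fun w => (PySem.Str.split₀ s).any (fun t => bSubseq w.toList t.toList)) := by
  induction ws with
  | nil => rfl
  | cons w ws ih =>
    have hw := hws w (List.mem_cons_self ..)
    have hws' : ∀ w ∈ ws, w.toList ≠ [] ∧ ∀ c ∈ w.toList, PySem.Chars.isspace c = false :=
      fun w hw => hws w (List.mem_cons_of_mem _ hw)
    simp only [aLoop1, aLoop2, List.any_cons]
    by_cases hin : PySem.Str.isIn w s = true
    · rcases loop1_covered w s hw.1 hw.2 hin with ⟨t, ht, hwt⟩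
      have hany : (PySem.Str.split₀ s).any (fun t => bSubseq w.toList t.toList) = true :=
        List.any_eq_true.mpr ⟨t, ht, hwt⟩
      simp [hany]
      exact Or.inl (Or.inl (by simpa using hin))
    · have hin' : PySem.Str.isIn w s = false := by
        cases hb : PySem.Str.isIn w s
        · rfl
        · exact absurd hb hin
      rw [hin', aTokens_eq_any, ← ih hws']
      cases hA : (PySem.Str.split₀ s).any (fun t => bSubseq w.toList t.toList) <;> simp

-- ============ B-side: the automaton scan ============

-- single-word version of bScan (proof device): same step, one counter
def sScan : List Char → List Char → Nat → Bool
  | [], _, _ => false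
  | ch :: rest, w, p =>
    if PySem.Chars.isspace ch then sScan rest w 0
    else
      let p' := if p < w.length && w[p]? == some ch then p + 1 else p
      if p' = w.length then true else sScan rest w p'

theorem any_orr {α : Type} (l : List α) (f g : α → Bool) :
    (l.any f || l.any g) = l.any (fun x => f x || g x) := by
  induction l with
  | nil => rfl
  | cons a l ih =>
    simp only [List.any_cons, ← ih]
    cases f a <;> cases g a <;> simp

theorem any_congr_mem {α : Type} {l : List α} {f g : α → Bool}
    (h : ∀ x ∈ l, f x = g x) : l.any f = l.any g := by
  induction l with
  | nil => rfl
  | cons a l ih =>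
    simp only [List.any_cons, h a (List.mem_cons_self ..),
      ih (fun x hx => h x (List.mem_cons_of_mem _ hx))]

-- the simultaneous scan is the disjunction of the single-word scans
theorem bScan_eq_any (text : List Char) :
    ∀ st : List (List Char × Nat), bScan text st = st.any (fun wp => sScan text wp.1 wp.2) := by
  induction text with
  | nil => intro st; simp [bScan, sScan]
  | cons ch rest ih =>
    intro st
    by_cases hws : PySem.Chars.isspace ch
    · simp only [bScan, hws, if_true]
      rw [ih, List.any_map]
      exact any_congr_mem (fun wp _ => by simp [sScan, hws, Function.comp])
    · simp only [bScan, hws, Bool.false_eq_true, if_false]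
      rw [ite_bool, ih, List.any_map, List.any_map, any_orr]
      apply any_congr_mem
      intro wp _
      obtain ⟨w, p⟩ := wp
      simp only [Function.comp_apply, bStep]
      by_cases hcond : (decide (p < w.length) && (w[p]? == some ch)) = true
      · simp only [hcond, if_true]
        by_cases hp1 : p + 1 = w.length
        · simp [sScan, hws, hcond, hp1]
        · simp [sScan, hws, hcond, hp1]
      · simp only [hcond, Bool.false_eq_true, if_false]
        by_cases hp0 : p = w.length
        · simp [sScan, hws, hcond, hp0]
        · simp [sScan, hws, hcond, hp0]

-- c-headed sublist of a list not starting with c skips the head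
theorem cons_sublist_cons_ne {c x : Char} {v l : List Char} (h : c ≠ x) :
    (c :: v).Sublist (x :: l) ↔ (c :: v).Sublist l := by
  constructor
  · intro hs
    cases hs with
    | cons _ h' => exact h'
    | cons₂ _ h' => exact absurd rfl h
  · exact fun hs => hs.cons x

theorem split₀_nil : PySem.Chars.split₀ ([] : List Char) = [] := rfl

theorem split₀_cons_ws {c : Char} (s : List Char) (h : PySem.Chars.isspace c = true) :
    PySem.Chars.split₀ (c :: s) = PySem.Chars.split₀ s := by
  simp [PySem.Chars.split₀, PySem.Chars.split₀.go, h]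

theorem split₀_go_first :
    ∀ (rest cur : List Char), cur ≠ [] → PySem.Chars.split₀.go rest cur []
      = (cur.reverse ++ rest.takeWhile (fun c => !PySem.Chars.isspace c))
        :: PySem.Chars.split₀ (rest.dropWhile (fun c => !PySem.Chars.isspace c)) := by
  intro rest
  induction rest with
  | nil =>
    intro cur hcur
    have h : cur.isEmpty = false := by cases cur; exact absurd rfl hcur; rfl
    simp [PySem.Chars.split₀.go, h, split₀_nil]
  | cons x r ih =>
    intro cur hcur
    by_cases hx : PySem.Chars.isspace x
    · have h : cur.isEmpty = false := by cases cur; exact absurd rfl hcur; rfl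
      simp only [PySem.Chars.split₀.go, hx, if_true, h, Bool.false_eq_true, if_false,
        List.takeWhile_cons, Bool.not_true, List.dropWhile_cons]
      rw [split₀_go_append r [] [cur.reverse], split₀_cons_ws r hx]
      simp [PySem.Chars.split₀]
    · simp only [PySem.Chars.split₀.go, hx, Bool.false_eq_true, if_false, List.takeWhile_cons,
        Bool.not_false, if_true, List.dropWhile_cons]
      rw [ih (x :: cur) (by simp)]
      simp

-- a word occurs in some token of s iff it occurs in the current token's remainder or later
theorem exists_token_split (w s : List Char) (hw : w ≠ []) :
    (∃ t ∈ PySem.Chars.split₀ s, w.Sublist t)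
      ↔ (w.Sublist (s.takeWhile (fun c => !PySem.Chars.isspace c))
          ∨ ∃ t ∈ PySem.Chars.split₀ (s.dropWhile (fun c => !PySem.Chars.isspace c)), w.Sublist t) := by
  cases s with
  | nil =>
    simp only [split₀_nil, List.takeWhile_nil, List.dropWhile_nil]
    constructor
    · rintro ⟨t, ht, _⟩; cases ht
    · rintro (h | ⟨t, ht, _⟩)
      · exact absurd (List.sublist_nil.mp h) hw
      · cases ht
  | cons x r =>
    by_cases hx : PySem.Chars.isspace x
    · have htw : (x :: r).takeWhile (fun c => !PySem.Chars.isspace c) = [] := by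
        simp [List.takeWhile_cons, hx]
      have hdw : (x :: r).dropWhile (fun c => !PySem.Chars.isspace c) = x :: r := by
        simp [List.dropWhile_cons, hx]
      rw [htw, hdw, split₀_cons_ws r hx]
      constructor
      · exact fun h => Or.inr h
      · rintro (h | h)
        · exact absurd (List.sublist_nil.mp h) hw
        · exact h
    · have htw : (x :: r).takeWhile (fun c => !PySem.Chars.isspace c)
          = x :: r.takeWhile (fun c => !PySem.Chars.isspace c) := by
        simp [List.takeWhile_cons, hx]
      have hdw : (x :: r).dropWhile (fun c => !PySem.Chars.isspace c)
          = r.dropWhile (fun c => !PySem.Chars.isspace c) := by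
        simp [List.dropWhile_cons, hx]
      have hsp : PySem.Chars.split₀ (x :: r) = PySem.Chars.split₀.go r [x] [] := by
        simp [PySem.Chars.split₀, PySem.Chars.split₀.go, hx]
      rw [htw, hdw, hsp, split₀_go_first r [x] (by simp)]
      simp only [List.reverse_singleton, List.singleton_append]
      constructor
      · rintro ⟨t, ht, hsub⟩
        rcases List.mem_cons.mp ht with rfl | ht'
        · exact Or.inl hsub
        · exact Or.inr ⟨t, ht', hsub⟩
      · rintro (h | ⟨t, ht, hsub⟩)
        · exact ⟨_, List.mem_cons_self .., h⟩
        · exact ⟨t, List.mem_cons_of_mem _ ht, hsub⟩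

-- single-word scan ⇔ the rest of the word fits the current token's remainder,
-- or the whole word fits a later token
theorem sScan_iff (w : List Char) (hw : w ≠ []) :
    ∀ (text : List Char) (p : Nat), p < w.length →
    (sScan text w p = true
      ↔ (w.drop p).Sublist (text.takeWhile (fun c => !PySem.Chars.isspace c))
        ∨ ∃ t ∈ PySem.Chars.split₀ (text.dropWhile (fun c => !PySem.Chars.isspace c)), w.Sublist t) := by
  intro text
  induction text with
  | nil =>
    intro p hp
    simp only [sScan, List.takeWhile_nil, List.dropWhile_nil, split₀_nil]
    constructor
    · intro h; cases h
    · rintro (h | ⟨t, ht, _⟩)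
      · have := List.drop_eq_nil_iff.mp (List.sublist_nil.mp h)
        omega
      · cases ht
  | cons ch rest ih =>
    intro p hp
    by_cases hws : PySem.Chars.isspace ch
    · have h0 : 0 < w.length := by cases w; exact absurd rfl hw; simp
      have htw : (ch :: rest).takeWhile (fun c => !PySem.Chars.isspace c) = [] := by
        simp [List.takeWhile_cons, hws]
      have hdw : (ch :: rest).dropWhile (fun c => !PySem.Chars.isspace c) = ch :: rest := by
        simp [List.dropWhile_cons, hws]
      rw [show sScan (ch :: rest) w p = sScan rest w 0 by simp [sScan, hws],
        htw, hdw, split₀_cons_ws rest hws, ih 0 h0, List.drop_zero,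
        ← exists_token_split w rest hw]
      constructor
      · exact fun h => Or.inr h
      · rintro (h | h)
        · exfalso
          have := List.drop_eq_nil_iff.mp (List.sublist_nil.mp h)
          omega
        · exact h
    · have hdropcons : w.drop p = w[p] :: w.drop (p + 1) := List.drop_eq_getElem_cons hp
      have htw : (ch :: rest).takeWhile (fun c => !PySem.Chars.isspace c)
          = ch :: rest.takeWhile (fun c => !PySem.Chars.isspace c) := by
        simp [List.takeWhile_cons, hws]
      have hdw : (ch :: rest).dropWhile (fun c => !PySem.Chars.isspace c)
          = rest.dropWhile (fun c => !PySem.Chars.isspace c) := by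
        simp [List.dropWhile_cons, hws]
      rw [htw, hdw]
      by_cases hc : (decide (p < w.length) && (w[p]? == some ch)) = true
      · have hch : w[p] = ch := by
          have h2 := (Bool.and_eq_true _ _).mp hc |>.2
          rw [List.getElem?_eq_getElem hp] at h2
          exact Option.some.inj (eq_of_beq h2)
        by_cases hdone : p + 1 = w.length
        · rw [show sScan (ch :: rest) w p = true by simp [sScan, hws, hc, hdone]]
          constructor
          · intro _
            left
            rw [hdropcons, hch]
            have hnil : w.drop (p + 1) = [] := by
              rw [List.drop_eq_nil_iff]; omega
            rw [hnil]
            exact (List.nil_sublist _).cons₂ ch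
          · intro _; rfl
        · rw [show sScan (ch :: rest) w p = sScan rest w (p + 1) by
            simp [sScan, hws, hc, hdone], ih (p + 1) (by omega), hdropcons, hch]
          constructor
          · rintro (h | h)
            · exact Or.inl (h.cons₂ ch)
            · exact Or.inr h
          · rintro (h | h)
            · exact Or.inl (List.cons_sublist_cons.mp h)
            · exact Or.inr h
      · have hne : w[p] ≠ ch := by
          intro he
          apply hc
          simp [hp, List.getElem?_eq_getElem hp, he]
        have hpne : ¬ p = w.length := by omega
        rw [show sScan (ch :: rest) w p = sScan rest w p by
          simp [sScan, hws, hc, hpne], ih p hp, hdropcons]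
        constructor
        · rintro (h | h)
          · exact Or.inl (h.cons ch)
          · exact Or.inr h
        · rintro (h | h)
          · exact Or.inl ((cons_sublist_cons_ne hne).mp h)
          · exact Or.inr h

-- the full scan from a fresh counter finds exactly a token containing the word as a subsequence
theorem sScan_zero_iff (w : List Char) (hw : w ≠ []) (text : List Char) :
    sScan text w 0 = true ↔ ∃ t ∈ PySem.Chars.split₀ text, w.Sublist t := by
  have h0 : 0 < w.length := by cases w; exact absurd rfl hw; simp
  rw [sScan_iff w hw text 0 h0, List.drop_zero, ← exists_token_split w text hw]

-- bridge: any over String tokens of bSubseq = existence over Chars tokens of Sublist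
theorem strTokens_any (w : List Char) (s : String) :
    (PySem.Str.split₀ s).any (fun t => bSubseq w t.toList) = true
      ↔ ∃ t ∈ PySem.Chars.split₀ s.toList, w.Sublist t := by
  rw [List.any_eq_true]
  constructor
  · rintro ⟨t, ht, hb⟩
    refine ⟨t.toList, ?_, sublist_of_bSubseq _ _ hb⟩
    rw [← PySem.Str.split₀_map_toList s]
    exact List.mem_map_of_mem ht
  · rintro ⟨t, ht, hsub⟩
    rw [← PySem.Str.split₀_map_toList s] at ht
    rcases List.mem_map.mp ht with ⟨t', ht', rfl⟩
    exact ⟨t', ht', bSubseq_of_sublist _ _ hsub⟩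

-- ===== VERDICT (by name: the statement is the Claim_ definition above) =====
theorem is_stressful_spec : Claim_equal_is_stressful := by
  intro subj _
  unfold Spec_is_stressful is_stressful is_stressful_alt
  simp only []
  rw [ite_bool, combined ["help", "asap", "urgent"] (PySem.Str.lower subj)
    (by intro w hw; fin_cases hw <;> exact ⟨by simp, by simp; decide⟩)]
  rw [bScan_eq_any]
  rw [List.any_map]
  apply any_congr_mem
  intro w hw
  have hnil : w.toList ≠ [] := by fin_cases hw <;> simp
  rw [Bool.eq_iff_iff]
  simp only [Function.comp_apply]
  rw [strTokens_any w.toList (PySem.Str.lower subj),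
    sScan_zero_iff w.toList hnil]
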